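-- pv_equiv track=rewrite | github.com/YJHeo01/BOJ | 36진수 - 1036번.py | search_answer
-- ===== SOURCE A (Python) =====
-- def search_digit(sum_value):
--     digit = 1
--     while 1:
--         if sum_value < 36 ** digit:
--             digit -= 1
--             break
--         digit += 1
--     return digit
--
-- def search_answer(sum_value):
--     ret_v = []
--     digit = search_digit(sum_value)
--     for i in range(digit,-1,-1):
--         tmp = sum_value // (36**i)
--         sum_value -= tmp * (36**i)
--         if tmp >= 10:
--             ret_v.append(chr(ord('A')+tmp-10))
--         else:
--             ret_v.append(str(tmp))
--     return ret_v
-- ===== SOURCE B (Python) =====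
-- def search_answer(sum_value):
--     if sum_value < 36:
--         return [chr(ord('A') + sum_value - 10) if sum_value >= 10 else str(sum_value)]
--     digits = []
--     while sum_value:
--         sum_value, r = divmod(sum_value, 36)
--         digits.append(chr(ord('A') + r - 10) if r >= 10 else str(r))
--     return digits[::-1]
-- ===== Notes on version B (the rewrite author's own statement) =====
-- stated objective: idiomatic
-- what changed: Replaces the digit-count search (search_digit) plus per-position 36**i power divisions with the standard repeated-divmod base conversion collecting digits least-significant-first and reversing, with a single-digit guard for values < 36 (covering 0 and negatives).
import Mathlib
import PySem

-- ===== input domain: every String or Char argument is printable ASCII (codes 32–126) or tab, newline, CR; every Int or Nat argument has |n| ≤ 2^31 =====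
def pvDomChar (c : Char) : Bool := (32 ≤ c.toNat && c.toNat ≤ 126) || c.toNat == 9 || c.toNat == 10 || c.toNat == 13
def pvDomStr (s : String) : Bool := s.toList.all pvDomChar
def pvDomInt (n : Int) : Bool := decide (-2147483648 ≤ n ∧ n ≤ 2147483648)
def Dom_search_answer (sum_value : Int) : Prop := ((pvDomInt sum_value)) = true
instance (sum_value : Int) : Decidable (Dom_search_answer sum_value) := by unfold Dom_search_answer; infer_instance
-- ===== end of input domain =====

-- B replaces the digit-count search and per-position 36**i divisions by the standard
-- repeated-divmod base-36 conversion (LSB-first, then reversed), with a single-digit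
-- guard for values < 36; same return value on every int.

-- shared digit rendering: `chr(ord('A')+t-10) if t >= 10 else str(t)` (appears verbatim in both Pythons)
def pvDigitStr (t : Int) : String :=
  if t ≥ 10 then String.ofList [Char.ofNat (65 + t - 10).toNat] else PySem.Int.toStr t

-- ===== PORT A =====
-- `while 1:` of search_digit; the fuel only makes the loop total (36**digit outgrows any fixed sum_value)
def searchDigitLoop (sum_value : Int) : Nat → Nat → Nat
  | digit, 0 => digit - 1
  | digit, fuel+1 =>
    if sum_value < (36:Int) ^ digit then digit - 1
    else searchDigitLoop sum_value (digit+1) fuel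

def search_digit (sum_value : Int) : Nat := searchDigitLoop sum_value 1 100

def search_answer (sum_value : Int) : List String :=
  let digit := search_digit sum_value
  (((PySem.List.pyRange (digit:Int) (-1) (-1)).foldl
      (fun (st : List String × Int) i =>
        let p : Int := (36:Int) ^ i.toNat
        let tmp := PySem.Int.floordiv st.2 p
        (st.1 ++ [pvDigitStr tmp], st.2 - tmp * p))
      ([], sum_value))).1

-- ===== PORT B =====
-- `while sum_value:` loop of Source B; fuel is a termination guard only
def pvBLoop : Int → List String → Nat → List String
  | _, digits, 0 => digits
  | sum_value, digits, fuel+1 =>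
    if sum_value = 0 then digits
    else pvBLoop (PySem.Int.floordiv sum_value 36)
           (digits ++ [pvDigitStr (PySem.Int.mod sum_value 36)]) fuel

def search_answer_alt (sum_value : Int) : List String :=
  if sum_value < 36 then [pvDigitStr sum_value]
  else (pvBLoop sum_value [] 100).reverse   -- digits[::-1]

-- ===== PRECONDITION & SPEC =====
def Spec_search_answer (sum_value : Int) (out : List String) : Prop := out = search_answer_alt sum_value
instance (sum_value : Int) (out : List String) : Decidable (Spec_search_answer sum_value out) := by unfold Spec_search_answer; infer_instance

-- ===== CLAIM (what is proved, stated in full; the proofs are below) =====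
def Claim_equal_search_answer : Prop := ∀ (sum_value : Int), Dom_search_answer sum_value → Spec_search_answer sum_value (search_answer sum_value)

-- ===== LEMMAS AND PROOFS =====

-- padded (d+1)-digit base-36 representation, most-significant first
def reprM : Nat → Nat → List String
  | 0, n => [pvDigitStr (n : Int)]
  | d+1, n => pvDigitStr ((n / 36^(d+1) : Nat) : Int) :: reprM d (n % 36^(d+1))

-- unpadded digits, least-significant first
def lsbN (n : Nat) : List String :=
  if h : n = 0 then [] else pvDigitStr ((n % 36 : Nat) : Int) :: lsbN (n / 36)
  decreasing_by exact Nat.div_lt_self (Nat.pos_of_ne_zero h) (by norm_num)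

theorem sd_char (s : Int) : ∀ (fuel digit : Nat), 1 ≤ digit →
    (36:Int)^(digit-1) ≤ s → s < (36:Int)^(digit-1+fuel) →
    (36:Int)^(searchDigitLoop s digit fuel) ≤ s ∧
      s < (36:Int)^(searchDigitLoop s digit fuel + 1) := by
  intro fuel
  induction fuel with
  | zero =>
    intro digit h1 h2 h3
    simp at h3
    exact absurd h2 (not_le.mpr h3)
  | succ fuel ih =>
    intro digit h1 h2 h3
    by_cases hlt : s < (36:Int) ^ digit
    · rw [searchDigitLoop, if_pos hlt]
      have hd : digit - 1 + 1 = digit := by omega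
      exact ⟨h2, by rwa [hd]⟩
    · rw [searchDigitLoop, if_neg hlt]
      have h2' : (36:Int)^(digit+1-1) ≤ s := by simpa using not_lt.mp hlt
      have h3' : s < (36:Int)^(digit+1-1+fuel) := by
        have he : digit - 1 + (fuel+1) = digit + 1 - 1 + fuel := by omega
        rwa [he] at h3
      exact ih (digit+1) (by omega) h2' h3'

theorem reprM_shift : ∀ (d n : Nat),
    reprM (d+1) n = reprM d (n / 36) ++ [pvDigitStr ((n % 36 : Nat) : Int)] := by
  intro d
  induction d with
  | zero => intro n; simp [reprM, pow_one]
  | succ d ih =>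
    intro n
    have hpow : 36^(d+1+1) = 36 * 36^(d+1) := by ring
    have e1 : n / 36 / 36^(d+1) = n / 36^(d+1+1) := by
      rw [Nat.div_div_eq_div_mul, hpow, Nat.mul_comm]
    have e2 : n % 36^(d+1+1) / 36 = n / 36 % 36^(d+1) := by
      rw [hpow, Nat.mul_comm 36, Nat.mod_mul_left_div_self]
    have e3 : n % 36^(d+1+1) % 36 = n % 36 := by
      exact Nat.mod_mod_of_dvd n (dvd_pow_self 36 (by omega))
    conv_lhs => rw [reprM, ih]
    conv_rhs => rw [reprM]
    rw [e1, e2, e3]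
    simp

theorem lsb_reprM : ∀ (d n : Nat), 36^d ≤ n → n < 36^(d+1) →
    (lsbN n).reverse = reprM d n := by
  intro d
  induction d with
  | zero =>
    intro n h1 h2
    rw [pow_one] at h2
    rw [lsbN, dif_neg (by omega : ¬ n = 0), lsbN, dif_pos (Nat.div_eq_of_lt h2),
      Nat.mod_eq_of_lt h2]
    simp [reprM]
  | succ d ih =>
    intro n h1 h2
    have h36 : (36:Nat) ≤ 36^(d+1) := Nat.le_self_pow (by omega) 36
    have hne : n ≠ 0 := by omega
    rw [lsbN, dif_neg hne, reprM_shift]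
    have hd1 : 36^d ≤ n / 36 := by
      rw [Nat.le_div_iff_mul_le (by omega)]
      calc 36^d * 36 = 36^(d+1) := by ring
        _ ≤ n := h1
    have hd2 : n / 36 < 36^(d+1) := by
      rw [Nat.div_lt_iff_lt_mul (by omega)]
      calc n < 36^(d+1+1) := h2
        _ = 36^(d+1) * 36 := by ring
    simp [ih (n/36) hd1 hd2]

theorem afold (d : Nat) : ∀ (n : Nat) (acc : List String), n < 36^(d+1) →
    (((PySem.List.pyRange (d:Int) (-1) (-1)).foldl
      (fun (st : List String × Int) i =>
        let p : Int := (36:Int) ^ i.toNat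
        let tmp := PySem.Int.floordiv st.2 p
        (st.1 ++ [pvDigitStr tmp], st.2 - tmp * p))
      (acc, (n:Int)))).1 = acc ++ reprM d n := by
  induction d with
  | zero =>
    intro n acc h
    have hr : PySem.List.pyRange (0:Int) (-1) (-1) = [0] := by decide
    simp [hr, reprM]
  | succ d ih =>
    intro n acc h
    have hlt : (-1:Int) < ((d+1 : Nat) : Int) := by push_cast; omega
    rw [PySem.List.pyRange_neg_one_cons hlt]
    simp only [List.foldl_cons]
    have htn : (((d+1 : Nat) : Int)).toNat = d + 1 := Int.toNat_natCast _
    have hp : (36:Int) ^ (((d+1 : Nat) : Int)).toNat = ((36^(d+1) : Nat) : Int) := by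
      rw [htn]; push_cast; ring
    have htmp : PySem.Int.floordiv (n:Int) ((36^(d+1) : Nat) : Int)
        = ((n / 36^(d+1) : Nat) : Int) := PySem.Int.floordiv_natCast n _
    have hmod : (n:Int) - ((n / 36^(d+1) : Nat) : Int) * ((36^(d+1) : Nat) : Int)
        = ((n % 36^(d+1) : Nat) : Int) := by
      have h : ((36^(d+1) : Nat) : Int) * ((n / 36^(d+1) : Nat) : Int)
          + ((n % 36^(d+1) : Nat) : Int) = (n:Int) := by
        exact_mod_cast Nat.div_add_mod n (36^(d+1))
      rw [mul_comm]
      linarith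
    have hsub : ((d+1 : Nat) : Int) - 1 = ((d : Nat) : Int) := by push_cast; omega
    simp only [hp, htmp, hmod, hsub]
    rw [ih (n % 36^(d+1)) _ (Nat.mod_lt _ (by positivity))]
    rw [reprM]
    simp

theorem bloop : ∀ (fuel n : Nat) (acc : List String), n < 36^fuel →
    pvBLoop (n:Int) acc fuel = acc ++ lsbN n := by
  intro fuel
  induction fuel with
  | zero =>
    intro n acc h
    have : n = 0 := by omega
    subst this
    rw [pvBLoop, lsbN]
    simp
  | succ fuel ih =>
    intro n acc h
    by_cases hn : n = 0
    · subst hn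
      rw [pvBLoop, if_pos (by norm_num), lsbN]
      simp
    · rw [pvBLoop, if_neg (by exact_mod_cast hn)]
      have hq : PySem.Int.floordiv (n:Int) 36 = ((n / 36 : Nat) : Int) := by
        exact_mod_cast PySem.Int.floordiv_natCast n 36
      have hr : PySem.Int.mod (n:Int) 36 = ((n % 36 : Nat) : Int) := by
        exact_mod_cast PySem.Int.mod_natCast n 36
      rw [hq, hr, ih (n/36) _ (by
        rw [Nat.div_lt_iff_lt_mul (by norm_num)]
        calc n < 36^(fuel+1) := h
          _ = 36^fuel * 36 := by ring)]
      conv_rhs => rw [lsbN, dif_neg hn]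
      simp

-- ===== VERDICT (by name: the statement is the Claim_ definition above) =====
theorem search_answer_spec : Claim_equal_search_answer := by
  intro s hdom
  show search_answer s = search_answer_alt s
  by_cases hs : s < 36
  · -- single digit: A's search_digit returns 0 and the loop runs once with 36**0 = 1
    have hd : search_digit s = 0 := by
      rw [search_digit, show (100:Nat) = 99+1 from rfl, searchDigitLoop,
        if_pos (by simpa using hs)]
    have hr : PySem.List.pyRange (0:Int) (-1) (-1) = [0] := by decide
    rw [search_answer_alt, if_pos hs]
    simp [search_answer, hd, hr]
  · -- multi digit
    rw [not_lt] at hs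
    have hdb : s ≤ 2147483648 := by
      have := of_decide_eq_true hdom
      omega
    set n := s.toNat with hn
    have hsn : s = (n : Int) := by omega
    have hbig : s < (36:Int)^100 := by
      calc s ≤ 2147483648 := hdb
        _ < (36:Int)^7 := by norm_num
        _ ≤ (36:Int)^100 := pow_le_pow_right₀ (by norm_num) (by norm_num)
    obtain ⟨h1, h2⟩ := sd_char s 100 1 (by norm_num)
      (by simpa using le_trans (by norm_num : (1:Int) ≤ 36) hs) (by simpa using hbig)
    set r := searchDigitLoop s 1 100 with hrdef
    have hn1 : 36^r ≤ n := by
      have : ((36^r : Nat) : Int) ≤ (n:Int) := by push_cast; rw [← hsn]; exact h1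
      exact_mod_cast this
    have hn2 : n < 36^(r+1) := by
      have : ((n:Nat) : Int) < ((36^(r+1) : Nat) : Int) := by push_cast; rw [← hsn]; exact h2
      exact_mod_cast this
    have hA : search_answer s = reprM r n := by
      rw [search_answer]
      show (((PySem.List.pyRange ((search_digit s : Nat) : Int) (-1) (-1)).foldl _ ([], s))).1 = _
      rw [show search_digit s = r from rfl, hsn]
      exact afold r n [] hn2
    have hB : search_answer_alt s = (lsbN n).reverse := by
      rw [search_answer_alt, if_neg (not_lt.mpr hs), hsn,
        bloop 100 n [] (by
          calc n ≤ 2147483648 := by omega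
            _ < 36^7 := by norm_num
            _ ≤ 36^100 := Nat.pow_le_pow_right (by norm_num) (by norm_num))]
      simp
    rw [hA, hB, lsb_reprM r n hn1 hn2]
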